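-- pv_equiv track=rewrite | github.com/KeyiZhong/cse415 | a1/a1.py | mystery_code
-- ===== SOURCE A (Python) =====
-- def mystery_code(x):
--     if len(x) == 1:
--         return x
--     if str.isalpha(x[0]):
--         if str.isupper(x[0]):
--             index = ord(x[0]) + 32
--             if index > 109:
--                 index = index - 13
--             else:
--                 index = index + 13
--             return chr(index) + mystery_code(x[1:])
--         else:
--             index = ord(x[0]) - 32
--             if index > 77:
--                 index = index - 13
--             else:
--                 index = index + 13
--             return chr(index) + mystery_code(x[1:])
--     else:
--         return x[0] + mystery_code(x[1:])
-- ===== SOURCE B (Python) =====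
-- UPPER = "ABCDEFGHIJKLMNOPQRSTUVWXYZ"
-- LOWER = "abcdefghijklmnopqrstuvwxyz"
-- _TABLE = str.maketrans(UPPER + LOWER, LOWER[13:] + LOWER[:13] + UPPER[13:] + UPPER[:13])
--
-- def mystery_code(x):
--     return x[:-1].translate(_TABLE) + x[-1]
-- ===== Notes on version B (the rewrite author's own statement) =====
-- stated objective: faster
-- what changed: Replaced A's recursive per-character isalpha/isupper/threshold branch cascade with a translation table built once via str.maketrans (case-swapped ROT13) applied to x[:-1] in one translate pass, then the unchanged last character appended.
import Mathlib
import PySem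

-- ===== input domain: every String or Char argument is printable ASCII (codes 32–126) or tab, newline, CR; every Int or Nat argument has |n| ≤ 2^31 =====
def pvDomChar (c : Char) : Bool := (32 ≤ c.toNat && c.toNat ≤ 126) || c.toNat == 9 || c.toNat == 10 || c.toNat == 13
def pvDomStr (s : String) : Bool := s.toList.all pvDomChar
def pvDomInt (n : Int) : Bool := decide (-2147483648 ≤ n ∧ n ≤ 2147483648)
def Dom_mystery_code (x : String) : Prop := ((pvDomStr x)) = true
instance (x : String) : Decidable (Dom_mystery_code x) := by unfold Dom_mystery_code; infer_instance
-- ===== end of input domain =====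

-- B replaces A's per-character recursive branch cascade by one precomputed rot13-and-swap-case
-- translation table applied to x[:-1] in a single pass (O(n) vs A's slice-and-concat recursion; timing run measured B faster).

-- ===== PORT A =====
-- A's recursion on the character list; Char.isAlpha / Char.isUpper are exact for
-- Python's str.isalpha / str.isupper on the printable-ASCII domain.
def mysteryA : List Char → List Char
  | [] => []              -- unreachable: Python A raises IndexError on "" (excluded by Pre_)
  | [c] => [c]
  | c :: rest =>
    if c.isAlpha then
      if c.isUpper then
        let index := c.toNat + 32
        let index := if index > 109 then index - 13 else index + 13
        Char.ofNat index :: mysteryA rest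
      else
        let index := c.toNat - 32
        let index := if index > 77 then index - 13 else index + 13
        Char.ofNat index :: mysteryA rest
    else c :: mysteryA rest

def mystery_code (x : String) : String := String.mk (mysteryA x.toList)

-- ===== PORT B =====
def bUpper : List Char := "ABCDEFGHIJKLMNOPQRSTUVWXYZ".toList
def bLower : List Char := "abcdefghijklmnopqrstuvwxyz".toList

-- str.maketrans(UPPER+LOWER, LOWER[13:]+LOWER[:13]+UPPER[13:]+UPPER[:13])
def bTable : List (Char × Char) :=
  List.zip (bUpper ++ bLower)
    (bLower.drop 13 ++ bLower.take 13 ++ bUpper.drop 13 ++ bUpper.take 13)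

-- one character through the translate table (unmapped characters pass through)
def bTr (c : Char) : Char := (bTable.lookup c).getD c

-- x[:-1].translate(_TABLE) + x[-1]; on "" Python raises IndexError (excluded by Pre_)
def mystery_code_alt (x : String) : String :=
  match (x.toList).getLast? with
  | some c => String.mk ((x.toList).dropLast.map bTr ++ [c])
  | none => ""

-- ===== PRECONDITION & SPEC =====
-- A raises IndexError on the empty string (x[0]); B raises there too (x[-1]).
def Pre_mystery_code (x : String) : Prop := x ≠ ""
instance (x : String) : Decidable (Pre_mystery_code x) := by unfold Pre_mystery_code; infer_instance
def pvWitness_mystery_code : String := "Hello!"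

def Spec_mystery_code (x : String) (out : String) : Prop := out = mystery_code_alt x
instance (x : String) (out : String) : Decidable (Spec_mystery_code x out) := by unfold Spec_mystery_code; infer_instance

-- ===== CLAIM (what is proved, stated in full; the proofs are below) =====
def Claim_equal_mystery_code : Prop := ∀ (x : String), Dom_mystery_code x → Pre_mystery_code x → Spec_mystery_code x (mystery_code x)

-- ===== LEMMAS AND PROOFS =====

-- A's per-character transformation, factored out of mysteryA's cons branch for the proof
def stepA (c : Char) : Char :=
  if c.isAlpha then
    if c.isUpper then
      let index := c.toNat + 32
      Char.ofNat (if index > 109 then index - 13 else index + 13)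
    else
      let index := c.toNat - 32
      Char.ofNat (if index > 77 then index - 13 else index + 13)
  else c

lemma mysteryA_cons_cons (c d : Char) (t : List Char) :
    mysteryA (c :: d :: t) = stepA c :: mysteryA (d :: t) := by
  simp only [mysteryA, stepA]
  split_ifs <;> rfl

set_option maxRecDepth 8192 in
lemma stepA_eq_bTr_lt128 : ∀ n : Fin 128, stepA (Char.ofNat n.val) = bTr (Char.ofNat n.val) := by
  decide

lemma stepA_eq_bTr (c : Char) (h : pvDomChar c = true) : stepA c = bTr c := by
  have hlt : c.toNat < 128 := by
    simp [pvDomChar] at h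
    omega
  have := stepA_eq_bTr_lt128 ⟨c.toNat, hlt⟩
  simpa [Char.ofNat_toNat] using this

lemma mysteryA_eq (l : List Char) (hd : ∀ c ∈ l, pvDomChar c = true) (hne : l ≠ []) :
    mysteryA l = l.dropLast.map bTr ++ [l.getLast hne] := by
  induction l with
  | nil => exact absurd rfl hne
  | cons c t ih =>
    cases t with
    | nil => simp [mysteryA]
    | cons d t' =>
      rw [mysteryA_cons_cons]
      have hd' : ∀ e ∈ d :: t', pvDomChar e = true := fun e he => hd e (List.mem_cons_of_mem _ he)
      rw [ih hd' (by simp)]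
      rw [stepA_eq_bTr c (hd c (by simp))]
      simp [List.getLast_cons]

-- ===== VERDICT (by name: the statement is the Claim_ definition above) =====
theorem mystery_code_spec : Claim_equal_mystery_code := by
  intro x hdom hpre
  unfold Spec_mystery_code mystery_code mystery_code_alt
  have hne : x.toList ≠ [] := fun h => hpre (String.toList_eq_nil_iff.mp h)
  have hd : ∀ c ∈ x.toList, pvDomChar c = true := by
    have := hdom
    simp only [Dom_mystery_code, pvDomStr, List.all_eq_true] at this
    exact fun c hc => this c hc
  rw [List.getLast?_eq_some_getLast hne]
  rw [mysteryA_eq x.toList hd hne]
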